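-- pv_equiv track=rewrite | github.com/Vshnnuu/LearnDash-AI | src/crm_simulator.py | simulate_crm_actions
-- ===== SOURCE A (Python) =====
-- from typing import List
--
-- def simulate_crm_actions(actions: List[str]) -> List[str]:
--     executed_steps: List[str] = []
--
--     counters = {
--         "offer": 1042,
--         "email": 2208,
--         "support": 3314,
--         "billing": 4471,
--         "learning": 5586,
--         "general": 6620,
--     }
--
--     for action in actions:
--         action_lower = action.lower()
--
--         if "discount" in action_lower or "offer" in action_lower:
--             executed_steps.append(
--                 f"[COMPLETED] Discount offer created — OFF-{counters['offer']} — Queued just now"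
--             )
--             counters["offer"] += 1
--
--         elif "email" in action_lower or "reactivation" in action_lower:
--             executed_steps.append(
--                 f"[QUEUED] Email campaign queued — EML-{counters['email']} — Queued just now"
--             )
--             counters["email"] += 1
--
--         elif "customer success" in action_lower or "support" in action_lower:
--             executed_steps.append(
--                 f"[OPEN] Support follow-up task created — SUP-{counters['support']} — Created just now"
--             )
--             counters["support"] += 1
--
--         elif "payment" in action_lower or "billing" in action_lower:
--             executed_steps.append(
--                 f"[OPEN] Billing intervention task created — BIL-{counters['billing']} — Created just now"
--             )
--             counters["billing"] += 1
--
--         elif "recommend" in action_lower or "course" in action_lower or "learning path" in action_lower: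
--             executed_steps.append(
--                 f"[QUEUED] Learning recommendation workflow queued — LRN-{counters['learning']} — Queued just now"
--             )
--             counters["learning"] += 1
--
--         else:
--             executed_steps.append(
--                 f"[LOGGED] Retention intervention logged — GEN-{counters['general']} — Logged just now"
--             )
--             counters["general"] += 1
--
--     deduped_steps: List[str] = []
--     seen = set()
--     for step in executed_steps:
--         if step not in seen:
--             deduped_steps.append(step)
--             seen.add(step)
--
--     return deduped_steps
-- ===== SOURCE B (Python) =====
-- from typing import List
--
-- # Group-by-category algorithm: classify every action first, then for each category
-- # write its lines into a preallocated output by position, numbering them by rank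
-- # (base + occurrence index).  No mutable counter dict, no dedup pass: each line
-- # embeds its category's occurrence rank, so all lines are distinct by construction.
--
-- _KEYWORDS = [
--     ("discount", "offer"),
--     ("email", "reactivation"),
--     ("customer success", "support"),
--     ("payment", "billing"),
--     ("recommend", "course", "learning path"),
-- ]
-- _BASE = [1042, 2208, 3314, 4471, 5586, 6620]
-- _PRE = [
--     "[COMPLETED] Discount offer created — OFF-",
--     "[QUEUED] Email campaign queued — EML-",
--     "[OPEN] Support follow-up task created — SUP-",
--     "[OPEN] Billing intervention task created — BIL-",
--     "[QUEUED] Learning recommendation workflow queued — LRN-",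
--     "[LOGGED] Retention intervention logged — GEN-",
-- ]
-- _SUF = [
--     " — Queued just now",
--     " — Queued just now",
--     " — Created just now",
--     " — Created just now",
--     " — Queued just now",
--     " — Logged just now",
-- ]
--
-- def _classify(action_lower: str) -> int:
--     for i, kws in enumerate(_KEYWORDS):
--         if any(kw in action_lower for kw in kws):
--             return i
--     return len(_KEYWORDS)  # general
--
-- def simulate_crm_actions(actions: List[str]) -> List[str]:
--     cats = [_classify(a.lower()) for a in actions]
--     out = [""] * len(cats)
--     for c in range(6):
--         positions = [i for i, x in enumerate(cats) if x == c]
--         for rank, i in enumerate(positions):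
--             out[i] = _PRE[c] + str(_BASE[c] + rank) + _SUF[c]
--     return out
-- ===== Notes on version B (the rewrite author's own statement) =====
-- stated objective: alternative
-- what changed: B replaces A's single stateful pass (mutable per-category counter dict, then a set-based dedup pass) by a group-by-category algorithm: a classification pass maps each action to a category index, then for each of the six categories its lines are written into a preallocated output at their positions, numbered base + occurrence rank; A's dedup pass is dropped, proved a no-op in Lean since every line embeds its category's strictly increasing rank.
import Mathlib
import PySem

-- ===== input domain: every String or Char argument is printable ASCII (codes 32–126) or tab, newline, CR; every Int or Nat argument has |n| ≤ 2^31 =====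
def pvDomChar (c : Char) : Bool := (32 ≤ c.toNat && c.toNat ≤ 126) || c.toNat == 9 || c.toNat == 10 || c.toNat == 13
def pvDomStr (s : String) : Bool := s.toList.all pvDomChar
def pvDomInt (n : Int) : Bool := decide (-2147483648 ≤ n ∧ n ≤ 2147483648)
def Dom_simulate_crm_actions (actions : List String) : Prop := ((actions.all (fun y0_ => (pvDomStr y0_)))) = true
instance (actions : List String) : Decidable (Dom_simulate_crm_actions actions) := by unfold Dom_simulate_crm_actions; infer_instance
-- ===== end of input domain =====

-- B replaces A's stateful counter-dict pass + dedup pass by two stateless stages: classify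
-- each action to a category index, then number line i in closed form as base + count of the
-- category among the earlier ones; A's dedup is a proved no-op and is omitted.  RETURN value only.

-- ===== PORT A =====
-- A's loop body: the if/elif chain (the f-string is ported as concatenation; counters[k] as
-- getD k 0 — all six keys are always present, so no KeyError is reachable).
def pvStepA (st : List String × PySem.Dict String Int) (action : String) :
    List String × PySem.Dict String Int :=
  let action_lower := PySem.Str.lower action
  let steps := st.1
  let counters := st.2
  if PySem.Str.isIn "discount" action_lower || PySem.Str.isIn "offer" action_lower then
    (steps ++ ["[COMPLETED] Discount offer created — OFF-" ++
        PySem.Int.toStr (counters.getD "offer" 0) ++ " — Queued just now"],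
     counters.insert "offer" (counters.getD "offer" 0 + 1))
  else if PySem.Str.isIn "email" action_lower || PySem.Str.isIn "reactivation" action_lower then
    (steps ++ ["[QUEUED] Email campaign queued — EML-" ++
        PySem.Int.toStr (counters.getD "email" 0) ++ " — Queued just now"],
     counters.insert "email" (counters.getD "email" 0 + 1))
  else if PySem.Str.isIn "customer success" action_lower || PySem.Str.isIn "support" action_lower then
    (steps ++ ["[OPEN] Support follow-up task created — SUP-" ++
        PySem.Int.toStr (counters.getD "support" 0) ++ " — Created just now"],
     counters.insert "support" (counters.getD "support" 0 + 1))
  else if PySem.Str.isIn "payment" action_lower || PySem.Str.isIn "billing" action_lower then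
    (steps ++ ["[OPEN] Billing intervention task created — BIL-" ++
        PySem.Int.toStr (counters.getD "billing" 0) ++ " — Created just now"],
     counters.insert "billing" (counters.getD "billing" 0 + 1))
  else if PySem.Str.isIn "recommend" action_lower || PySem.Str.isIn "course" action_lower || PySem.Str.isIn "learning path" action_lower then
    (steps ++ ["[QUEUED] Learning recommendation workflow queued — LRN-" ++
        PySem.Int.toStr (counters.getD "learning" 0) ++ " — Queued just now"],
     counters.insert "learning" (counters.getD "learning" 0 + 1))
  else
    (steps ++ ["[LOGGED] Retention intervention logged — GEN-" ++
        PySem.Int.toStr (counters.getD "general" 0) ++ " — Logged just now"],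
     counters.insert "general" (counters.getD "general" 0 + 1))

-- A's second loop: dedup keeping first occurrences, via a `seen` set.
def pvDedupA (steps : List String) : List String :=
  (steps.foldl
    (fun (st : List String × PySem.Set String) step =>
      if st.2.contains step then st else (st.1 ++ [step], st.2.add step))
    ([], PySem.Set.empty)).1

def pvInitCounters : PySem.Dict String Int :=
  PySem.Dict.ofList [("offer", 1042), ("email", 2208), ("support", 3314),
                     ("billing", 4471), ("learning", 5586), ("general", 6620)]

def simulate_crm_actions (actions : List String) : List String :=
  pvDedupA (actions.foldl pvStepA ([], pvInitCounters)).1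

-- ===== PORT B =====
-- Source B's module tables
def pvKws : List (List String) :=
  [["discount", "offer"], ["email", "reactivation"], ["customer success", "support"],
   ["payment", "billing"], ["recommend", "course", "learning path"]]
def pvBases : List Int := [1042, 2208, 3314, 4471, 5586, 6620]
def pvPres : List String :=
  ["[COMPLETED] Discount offer created — OFF-", "[QUEUED] Email campaign queued — EML-",
   "[OPEN] Support follow-up task created — SUP-", "[OPEN] Billing intervention task created — BIL-",
   "[QUEUED] Learning recommendation workflow queued — LRN-",
   "[LOGGED] Retention intervention logged — GEN-"]
def pvSufs : List String :=
  [" — Queued just now", " — Queued just now", " — Created just now",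
   " — Created just now", " — Queued just now", " — Logged just now"]

-- Source B's _classify: index of the first keyword row with a match, 5 (general) if none --
-- exactly List.findIdx (which returns the length when no row matches).  The category
-- code and the table lookups _PRE[c]/_BASE[c]/_SUF[c] are small nonnegative ints,
-- carried as Nat with List.getD (c < 6 always, so the default is never read).
def pvClassify (action_lower : String) : Nat :=
  pvKws.findIdx (fun kws => kws.any (fun kw => PySem.Str.isIn kw action_lower))

-- '[i for i, x in enumerate(cats) if x == c]' (positions are nonnegative Python ints)
def pvPositions (cats : List Nat) (c : Nat) : List Int :=
  ((PySem.List.enumerate cats).filter (fun p => p.2 == c)).map (fun p => p.1)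

-- 'for rank, i in enumerate(positions): out[i] = _PRE[c] + str(_BASE[c] + rank) + _SUF[c]'
-- (out[i] = v on a valid nonnegative index is List.set i.toNat v)
def pvFillCat (cats : List Nat) (out : List String) (c : Nat) : List String :=
  (PySem.List.enumerate (pvPositions cats c)).foldl
    (fun out p =>
      out.set p.2.toNat
        (pvPres.getD c "" ++ PySem.Int.toStr (pvBases.getD c 0 + p.1) ++ pvSufs.getD c ""))
    out

def simulate_crm_actions_alt (actions : List String) : List String :=
  let cats := actions.map (fun a => pvClassify (PySem.Str.lower a))
  (List.range 6).foldl (fun out c => pvFillCat cats out c)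
    (List.replicate cats.length "")

-- ===== PRECONDITION & SPEC =====
def Spec_simulate_crm_actions (actions : List String) (out : List String) : Prop := out = simulate_crm_actions_alt actions
instance (actions : List String) (out : List String) : Decidable (Spec_simulate_crm_actions actions out) := by unfold Spec_simulate_crm_actions; infer_instance

-- ===== CLAIM (what is proved, stated in full; the proofs are below) =====
def Claim_equal_simulate_crm_actions : Prop := ∀ (actions : List String), Dom_simulate_crm_actions actions → Spec_simulate_crm_actions actions (simulate_crm_actions actions)

-- ===== LEMMAS AND PROOFS =====

-- closed-form characterisation used by the proofs: the line at position i is rendered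
-- from its category and the count of that category among the earlier positions
def pvBout (cats : List Nat) : List String :=
  (PySem.List.enumerate cats).map (fun p =>
    pvPres.getD p.2 "" ++
    PySem.Int.toStr (pvBases.getD p.2 0 + ((PySem.List.slice cats none (some p.1)).count p.2 : Int)) ++
    pvSufs.getD p.2 "")

-- counter keys of the six categories (proof-side naming; A hardcodes them)
def pvKey (c : Nat) : String :=
  ["offer", "email", "support", "billing", "learning", "general"].getD c ""

-- the code points of the line a category c with counter value n produces
def pvRender (c : Nat) (n : Int) : List Char :=
  (pvPres.getD c "").toList ++ PySem.Int.toChars n ++ (pvSufs.getD c "").toList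

theorem pvLine_toList (c : Nat) (n : Int) :
    (pvPres.getD c "" ++ PySem.Int.toStr n ++ pvSufs.getD c "").toList = pvRender c n := by
  simp [pvRender, PySem.Int.toList_toStr]

-- Source B's _classify agrees with A's if/elif chain (same keywords, same priority)
theorem pvClassify_chain (s : String) :
    pvClassify s =
      (if PySem.Str.isIn "discount" s || PySem.Str.isIn "offer" s then 0
      else if PySem.Str.isIn "email" s || PySem.Str.isIn "reactivation" s then 1
      else if PySem.Str.isIn "customer success" s || PySem.Str.isIn "support" s then 2
      else if PySem.Str.isIn "payment" s || PySem.Str.isIn "billing" s then 3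
      else if PySem.Str.isIn "recommend" s || PySem.Str.isIn "course" s || PySem.Str.isIn "learning path" s then 4
      else 5) := by
  simp only [pvClassify, pvKws, List.findIdx_cons, List.findIdx_nil, List.any_cons,
    List.any_nil, Bool.or_false, Bool.cond_eq_ite]
  split_ifs <;> simp_all

theorem pvClassify_lt (s : String) : pvClassify s < 6 := by
  have h := List.findIdx_le_length
    (p := fun kws : List String => kws.any (fun kw => PySem.Str.isIn kw s)) (xs := pvKws)
  have h5 : pvKws.length = 5 := rfl
  unfold pvClassify
  omega

-- A's loop body, characterised through B's classifier
theorem pvStepA_eq (st : List String × PySem.Dict String Int) (a : String) :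
    pvStepA st a =
      (st.1 ++ [pvPres.getD (pvClassify (PySem.Str.lower a)) "" ++
          PySem.Int.toStr (st.2.getD (pvKey (pvClassify (PySem.Str.lower a))) 0) ++
          pvSufs.getD (pvClassify (PySem.Str.lower a)) ""],
       st.2.insert (pvKey (pvClassify (PySem.Str.lower a)))
         (st.2.getD (pvKey (pvClassify (PySem.Str.lower a))) 0 + 1)) := by
  rw [pvClassify_chain]
  unfold pvStepA
  dsimp only
  split_ifs <;> rfl

theorem pvGetD_insert (d : PySem.Dict String Int) (k k' : String) (v d0 : Int) :
    (d.insert k v).getD k' d0 = if k' == k then v else d.getD k' d0 := by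
  simp [pysem]

theorem pvKey_ne (c c' : Nat) (hc : c < 6) (hc' : c' < 6) (h : c ≠ c') :
    (pvKey c == pvKey c') = false := by
  interval_cases c <;> interval_cases c' <;> simp_all <;> decide

-- appending one category to the classification list appends exactly one line
theorem pvBout_snoc (cs : List Nat) (c : Nat) :
    pvBout (cs ++ [c]) = pvBout cs ++
      [pvPres.getD c "" ++ PySem.Int.toStr (pvBases.getD c 0 + (cs.count c : Int)) ++
       pvSufs.getD c ""] := by
  unfold pvBout
  rw [PySem.List.enumerate_append, List.map_append]
  congr 1
  · apply List.map_congr_left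
    intro p hp
    obtain ⟨k, hk, rfl⟩ := (PySem.List.mem_enumerate_iff _ _ _).mp hp
    simp only [zero_add]
    rw [PySem.List.slice_to_natCast, PySem.List.slice_to_natCast,
      List.take_append_of_le_length (le_of_lt hk)]
  · simp [PySem.List.enumerate_cons, PySem.List.enumerate_nil, zero_add,
      PySem.List.slice_to_natCast]

-- every line of pvBout cs is the render of its position's category and prefix count
theorem pvBout_mem (cs : List Nat) (s : String) (hs : s ∈ pvBout cs) :
    ∃ k, ∃ _ : k < cs.length,
      s = pvPres.getD cs[k] "" ++
          PySem.Int.toStr (pvBases.getD cs[k] 0 + ((cs.take k).count cs[k] : Int)) ++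
          pvSufs.getD cs[k] "" := by
  unfold pvBout at hs
  obtain ⟨p, hp, rfl⟩ := List.mem_map.mp hs
  obtain ⟨k, hk, rfl⟩ := (PySem.List.mem_enumerate_iff _ _ _).mp hp
  refine ⟨k, hk, ?_⟩
  simp only [zero_add]
  rw [PySem.List.slice_to_natCast]

-- ## decimal strings are injective on the nonnegative integers

def pvVal (a : Nat) (cs : List Char) : Nat :=
  cs.foldl (fun acc c => acc * 10 + (c.toNat - 48)) a

theorem pvToDigitsCore_acc (b f n : Nat) (ds : List Char) :
    Nat.toDigitsCore b f n ds = Nat.toDigitsCore b f n [] ++ ds := by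
  induction f generalizing n ds with
  | zero => simp [Nat.toDigitsCore]
  | succ f ih =>
    simp only [Nat.toDigitsCore]
    split_ifs with h
    · rfl
    · rw [ih _ ((n % b).digitChar :: ds), ih _ [(n % b).digitChar]]
      simp

theorem pvVal_append (a : Nat) (l1 l2 : List Char) :
    pvVal a (l1 ++ l2) = pvVal (pvVal a l1) l2 := by
  simp [pvVal, List.foldl_append]

theorem pvDigitChar_val (d : Nat) (h : d < 10) : (Nat.digitChar d).toNat - 48 = d := by
  interval_cases d <;> rfl

theorem pvVal_toDigitsCore (f n : Nat) (a : Nat) (h : n < 10 ^ f) :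
    pvVal a (Nat.toDigitsCore 10 f n []) = a * 10 ^ (Nat.toDigitsCore 10 f n []).length + n := by
  induction f generalizing n a with
  | zero =>
    have h0 : n = 0 := by omega
    subst h0
    simp [Nat.toDigitsCore, pvVal]
  | succ f ih =>
    simp only [Nat.toDigitsCore]
    split_ifs with hd
    · have h10 : n % 10 = n := by omega
      have hn10 : n < 10 := by omega
      simp [pvVal, h10, pvDigitChar_val n hn10]
    · rw [pvToDigitsCore_acc]
      have hn' : n / 10 < 10 ^ f := by
        rw [pow_succ] at h
        exact Nat.div_lt_of_lt_mul (by omega)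
      rw [pvVal_append, ih _ a hn']
      have : pvVal (a * 10 ^ (Nat.toDigitsCore 10 f (n / 10) []).length + n / 10)
          [(n % 10).digitChar] =
          (a * 10 ^ (Nat.toDigitsCore 10 f (n / 10) []).length + n / 10) * 10 + n % 10 := by
        simp [pvVal, pvDigitChar_val (n % 10) (by omega)]
      rw [this]
      rw [List.length_append, List.length_singleton, pow_succ]
      ring_nf
      omega

theorem pvToDigits_inj (n m : Nat) (h : Nat.toDigits 10 n = Nat.toDigits 10 m) : n = m := by
  have hn := pvVal_toDigitsCore (n + 1) n 0 (by
    calc n < 10 ^ n := Nat.lt_pow_self (by norm_num)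
    _ ≤ 10 ^ (n + 1) := Nat.pow_le_pow_right (by norm_num) (by omega))
  have hm := pvVal_toDigitsCore (m + 1) m 0 (by
    calc m < 10 ^ m := Nat.lt_pow_self (by norm_num)
    _ ≤ 10 ^ (m + 1) := Nat.pow_le_pow_right (by norm_num) (by omega))
  unfold Nat.toDigits at h
  rw [h] at hn
  simp at hn hm
  omega

theorem pvToChars_inj (n m : Int) (hn : 0 ≤ n) (hm : 0 ≤ m)
    (h : PySem.Int.toChars n = PySem.Int.toChars m) : n = m := by
  unfold PySem.Int.toChars at h
  rw [if_neg (by omega), if_neg (by omega)] at h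
  have := pvToDigits_inj _ _ h
  omega

theorem pvRender_inj (i j : Nat) (n m : Int) (hi : i < 6) (hj : j < 6)
    (hn : 0 ≤ n) (hm : 0 ≤ m) (h : pvRender i n = pvRender j m) : i = j ∧ n = m := by
  have hij : i = j := by
    have h10 := congrArg (List.take 10) h
    unfold pvRender at h10
    rw [List.append_assoc, List.append_assoc,
      List.take_append_of_le_length (by interval_cases i <;> decide),
      List.take_append_of_le_length (by interval_cases j <;> decide)] at h10
    interval_cases i <;> interval_cases j <;> first | rfl | (exfalso; revert h10; decide)
  subst hij
  refine ⟨rfl, ?_⟩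
  unfold pvRender at h
  rw [List.append_assoc, List.append_assoc] at h
  exact pvToChars_inj n m hn hm
    (List.append_cancel_right (List.append_cancel_left h))

theorem pvBase_nonneg (c : Nat) (hc : c < 6) : 0 ≤ pvBases.getD c 0 := by
  interval_cases c <;> decide

-- at a position holding category c, the prefix count is strictly below the total count
theorem pvCount_take_lt (cs : List Nat) (k : Nat) (hk : k < cs.length) :
    (cs.take k).count cs[k] < cs.count cs[k] := by
  have hsplit : cs.count cs[k] = (cs.take k).count cs[k] + (cs.drop k).count cs[k] := by
    rw [← List.count_append, List.take_append_drop]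
  rw [List.drop_eq_getElem_cons hk, List.count_cons] at hsplit
  simp only [BEq.rfl, if_true] at hsplit
  omega

-- the whole output of B is duplicate-free: each line embeds its occurrence number
theorem pvBout_nodup (cs : List Nat) (hall : ∀ x ∈ cs, x < 6) : (pvBout cs).Nodup := by
  induction cs using List.reverseRecOn with
  | nil => simp [pvBout]
  | append_singleton cs c ih =>
    have hall' : ∀ x ∈ cs, x < 6 := fun x hx => hall x (List.mem_append_left _ hx)
    have hc : c < 6 := hall c (by simp)
    rw [pvBout_snoc, List.nodup_append]
    refine ⟨ih hall', List.nodup_singleton _, ?_⟩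
    intro s hs t ht hst
    have ht' : t = pvPres.getD c "" ++
        PySem.Int.toStr (pvBases.getD c 0 + (cs.count c : Int)) ++ pvSufs.getD c "" := by
      simpa using ht
    obtain ⟨k, hk, rfl⟩ := pvBout_mem cs s hs
    have hck : cs[k] < 6 := hall' _ (List.getElem_mem hk)
    have hr : pvRender cs[k] (pvBases.getD cs[k] 0 + ((cs.take k).count cs[k] : Int)) =
        pvRender c (pvBases.getD c 0 + (cs.count c : Int)) := by
      rw [← pvLine_toList, ← pvLine_toList]
      exact congrArg String.toList (hst.trans ht')
    obtain ⟨hcc, hnn⟩ := pvRender_inj _ _ _ _ hck hc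
      (by have := pvBase_nonneg _ hck; positivity)
      (by have := pvBase_nonneg _ hc; positivity) hr
    subst hcc
    have := pvCount_take_lt cs k hk
    omega

-- A's fold, tracked against B's closed form
theorem pvFold_eq (acts : List String) (cs : List Nat)
    (st : List String × PySem.Dict String Int)
    (h1 : st.1 = pvBout cs)
    (h2 : ∀ c, c < 6 → st.2.getD (pvKey c) 0 = pvBases.getD c 0 + (cs.count c : Int)) :
    (acts.foldl pvStepA st).1 =
      pvBout (cs ++ acts.map (fun a => pvClassify (PySem.Str.lower a))) := by
  induction acts generalizing cs st with
  | nil => simpa using h1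
  | cons a rest ih =>
    simp only [List.foldl_cons, List.map_cons]
    rw [show cs ++ pvClassify (PySem.Str.lower a) ::
          rest.map (fun a => pvClassify (PySem.Str.lower a)) =
        (cs ++ [pvClassify (PySem.Str.lower a)]) ++
          rest.map (fun a => pvClassify (PySem.Str.lower a)) by simp]
    set c0 := pvClassify (PySem.Str.lower a) with hc0
    have hc0lt : c0 < 6 := pvClassify_lt _
    apply ih (cs ++ [c0])
    · rw [pvStepA_eq, ← hc0, h1, pvBout_snoc, h2 c0 hc0lt]
    · intro c hc
      rw [pvStepA_eq, ← hc0]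
      rcases eq_or_ne c c0 with rfl | hne
      · rw [pvGetD_insert, if_pos (by simp), h2 _ hc]
        simp [List.count_append]
        ring
      · have hkey : (pvKey c == pvKey c0) = false := pvKey_ne c c0 hc hc0lt hne
        rw [pvGetD_insert, if_neg (by simp [hkey]), h2 c hc]
        simp [List.count_append, Ne.symm hne]

-- A's dedup pass is the identity on a list without duplicates
theorem pvDedup_go (l acc : List String) (seen : PySem.Set String)
    (hnd : l.Nodup) (hseen : ∀ x ∈ l, seen.contains x = false) :
    (l.foldl (fun (st : List String × PySem.Set String) step =>
        if st.2.contains step then st else (st.1 ++ [step], st.2.add step))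
      (acc, seen)).1 = acc ++ l := by
  induction l generalizing acc seen with
  | nil => simp
  | cons x xs ih =>
    simp only [List.foldl_cons, hseen x (List.mem_cons_self), if_neg, Bool.false_eq_true,
      not_false_iff]
    rw [ih _ _ hnd.of_cons]
    · simp
    · intro y hy
      have hxy : y ≠ x := fun hxy => (List.nodup_cons.mp hnd).1 (hxy ▸ hy)
      have : y ∈ PySem.Set.add seen x ↔ False := by
        simp [PySem.Set.mem_add, hxy]
        intro hmem
        have := hseen y (List.mem_cons_of_mem _ hy)
        simp at this
        exact this hmem
      simpa [PySem.Set.contains_iff] using this.mp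

theorem pvDedupA_nodup (l : List String) (h : l.Nodup) : pvDedupA l = l := by
  unfold pvDedupA
  rw [pvDedup_go l [] PySem.Set.empty h (by intro x _; rfl)]
  simp

-- ## B's group-by-category passes produce exactly pvBout

-- positions of category c, with their ranks: rank = count of c among the earlier entries
theorem pvPos_snoc (cs : List Nat) (x c : Nat) :
    pvPositions (cs ++ [x]) c =
      pvPositions cs c ++ (if x = c then [(cs.length : Int)] else []) := by
  unfold pvPositions
  rw [PySem.List.enumerate_append, List.filter_append, List.map_append]
  by_cases hx : x = c <;>
    simp [PySem.List.enumerate_cons, PySem.List.enumerate_nil, hx]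

theorem pvPos_len (cs : List Nat) (c : Nat) :
    (pvPositions cs c).length = cs.count c := by
  induction cs using List.reverseRecOn with
  | nil => rfl
  | append_singleton cs x ih =>
    rw [pvPos_snoc, List.length_append, ih, List.count_append, List.count_cons]
    by_cases hx : x = c <;> simp [hx]

theorem pvEnumPos_char (cs : List Nat) (c : Nat) :
    PySem.List.enumerate (pvPositions cs c) =
      ((PySem.List.enumerate cs).filter (fun p => p.2 == c)).map
        (fun p => (((cs.take p.1.toNat).count c : Int), p.1)) := by
  induction cs using List.reverseRecOn with
  | nil => rfl
  | append_singleton cs x ih =>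
    rw [pvPos_snoc, PySem.List.enumerate_append, ih, PySem.List.enumerate_append,
      List.filter_append, List.map_append]
    congr 1
    · apply List.map_congr_left
      intro p hp
      have hp' := List.mem_of_mem_filter hp
      obtain ⟨k, hk, rfl⟩ := (PySem.List.mem_enumerate_iff _ _ _).mp hp'
      simp only [zero_add, Int.toNat_natCast]
      rw [List.take_append_of_le_length (le_of_lt hk)]
    · rw [zero_add, pvPos_len]
      by_cases hx : x = c
      · subst hx
        simp [PySem.List.enumerate_cons, PySem.List.enumerate_nil, Int.toNat_natCast]
      · simp [hx, PySem.List.enumerate_cons, PySem.List.enumerate_nil]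

theorem pvEnumPos_mem (cs : List Nat) (c : Nat) (p : Int × Int)
    (hp : p ∈ PySem.List.enumerate (pvPositions cs c)) :
    ∃ k, ∃ _ : k < cs.length, cs[k] = c ∧
      p = (((cs.take k).count c : Int), (k : Int)) := by
  rw [pvEnumPos_char] at hp
  obtain ⟨q, hq, rfl⟩ := List.mem_map.mp hp
  have hq2 := List.of_mem_filter hq
  obtain ⟨k, hk, rfl⟩ := (PySem.List.mem_enumerate_iff _ _ _).mp (List.mem_of_mem_filter hq)
  refine ⟨k, hk, by simpa using hq2, by simp⟩

theorem pvEnumPos_mem_of (cs : List Nat) (c : Nat) (k : Nat) (hk : k < cs.length)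
    (hc : cs[k] = c) :
    (((cs.take k).count c : Int), (k : Int)) ∈ PySem.List.enumerate (pvPositions cs c) := by
  rw [pvEnumPos_char]
  refine List.mem_map.mpr ⟨((k : Int), cs[k]), ?_, by simp⟩
  refine List.mem_filter.mpr ⟨?_, by simp [hc]⟩
  exact (PySem.List.mem_enumerate_iff _ _ _).mpr ⟨k, hk, by simp⟩

theorem pvEnumPos_pairwise (cs : List Nat) (c : Nat) :
    (PySem.List.enumerate (pvPositions cs c)).Pairwise
      (fun p q => p.2.toNat ≠ q.2.toNat) := by
  rw [pvEnumPos_char]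
  rw [List.pairwise_map]
  have hpw : ((PySem.List.enumerate cs).filter (fun p => p.2 == c)).Pairwise
      (fun p q : Int × Nat => p.1 < q.1) := by
    have h := PySem.List.pairwise_lt_enumerate (xs := cs) (s := 0)
    exact h.sublist List.filter_sublist
  refine hpw.imp_of_mem ?_
  intro p q hp hq hlt
  obtain ⟨k, hk, rfl⟩ := (PySem.List.mem_enumerate_iff _ _ _).mp (List.mem_of_mem_filter hp)
  obtain ⟨l, hl, rfl⟩ := (PySem.List.mem_enumerate_iff _ _ _).mp (List.mem_of_mem_filter hq)
  simp only [zero_add] at hlt ⊢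
  omega

-- generic facts about a fold of positional writes
theorem pvFoldSet_len (ps : List (Int × Int)) (g : Int × Int → String) (out : List String) :
    (ps.foldl (fun o p => o.set p.2.toNat (g p)) out).length = out.length := by
  induction ps generalizing out with
  | nil => rfl
  | cons p ps ih => simp [ih]

theorem pvFoldSet_untouched (ps : List (Int × Int)) (g : Int × Int → String)
    (out : List String) (j : Nat) (h : ∀ p ∈ ps, p.2.toNat ≠ j) :
    (ps.foldl (fun o p => o.set p.2.toNat (g p)) out)[j]? = out[j]? := by
  induction ps generalizing out with
  | nil => rfl
  | cons p ps ih =>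
    rw [List.foldl_cons, ih _ (fun q hq => h q (List.mem_cons_of_mem _ hq)),
      List.getElem?_set_ne (h p List.mem_cons_self)]

theorem pvFoldSet_written (ps : List (Int × Int)) (g : Int × Int → String)
    (out : List String) (p : Int × Int)
    (hdist : ps.Pairwise (fun p q => p.2.toNat ≠ q.2.toNat))
    (hp : p ∈ ps) (hj : p.2.toNat < out.length) :
    (ps.foldl (fun o p => o.set p.2.toNat (g p)) out)[p.2.toNat]? = some (g p) := by
  obtain ⟨l1, l2, rfl⟩ := List.append_of_mem hp
  have hpair := List.pairwise_append.mp hdist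
  have hcons := List.pairwise_cons.mp hpair.2.1
  rw [List.foldl_append, List.foldl_cons,
    pvFoldSet_untouched _ _ _ _ (fun q hq => (hcons.1 q hq).symm),
    List.getElem?_set_self (by rw [pvFoldSet_len]; exact hj)]

-- the per-category fill, characterised position by position
theorem pvFill_len (cats : List Nat) (out : List String) (c : Nat) :
    (pvFillCat cats out c).length = out.length := by
  unfold pvFillCat
  exact pvFoldSet_len _ _ _

theorem pvFill_ne (cats : List Nat) (out : List String) (c : Nat) (j : Nat)
    (hj : j < cats.length) (hne : cats[j] ≠ c) :
    (pvFillCat cats out c)[j]? = out[j]? := by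
  unfold pvFillCat
  apply pvFoldSet_untouched
  intro p hp
  obtain ⟨k, hk, hkc, rfl⟩ := pvEnumPos_mem cats c p hp
  simp only [Int.toNat_natCast]
  intro h
  exact hne (h ▸ hkc)

theorem pvFill_eq (cats : List Nat) (out : List String) (c : Nat) (j : Nat)
    (hj : j < cats.length) (hlen : out.length = cats.length) (hc : cats[j] = c) :
    (pvFillCat cats out c)[j]? =
      some (pvPres.getD c "" ++
        PySem.Int.toStr (pvBases.getD c 0 + ((cats.take j).count c : Int)) ++
        pvSufs.getD c "") := by
  unfold pvFillCat
  have h := pvFoldSet_written (PySem.List.enumerate (pvPositions cats c))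
    (fun p => pvPres.getD c "" ++ PySem.Int.toStr (pvBases.getD c 0 + p.1) ++ pvSufs.getD c "")
    out (((cats.take j).count c : Int), (j : Int))
    (pvEnumPos_pairwise cats c) (pvEnumPos_mem_of cats c j hj hc) (by simpa [hlen] using hj)
  simpa using h

-- pvBout, read off at a position
theorem pvBout_len (cats : List Nat) : (pvBout cats).length = cats.length := by
  simp [pvBout, PySem.List.length_enumerate]

theorem pvBout_getElem? (cats : List Nat) (j : Nat) (hj : j < cats.length) :
    (pvBout cats)[j]? =
      some (pvPres.getD cats[j] "" ++
        PySem.Int.toStr (pvBases.getD cats[j] 0 + ((cats.take j).count cats[j] : Int)) ++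
        pvSufs.getD cats[j] "") := by
  unfold pvBout
  rw [List.getElem?_map, PySem.List.getElem?_enumerate]
  simp [List.getElem?_eq_getElem hj, PySem.List.slice_to_natCast]

-- folding fills over a list of categories, read off at one position
theorem pvFillFold_len (cats : List Nat) (cks : List Nat) (out : List String) :
    (cks.foldl (fun o c => pvFillCat cats o c) out).length = out.length := by
  induction cks generalizing out with
  | nil => rfl
  | cons c cks ih => simp [ih, pvFill_len]

theorem pvFillFold (cats : List Nat) (cks : List Nat) (out : List String) (j : Nat)
    (hj : j < cats.length) (hlen : out.length = cats.length) :
    (cks.foldl (fun o c => pvFillCat cats o c) out)[j]? =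
      if cats[j] ∈ cks then
        some (pvPres.getD cats[j] "" ++
          PySem.Int.toStr (pvBases.getD cats[j] 0 + ((cats.take j).count cats[j] : Int)) ++
          pvSufs.getD cats[j] "")
      else out[j]? := by
  induction cks generalizing out with
  | nil => simp
  | cons c cks ih =>
    rw [List.foldl_cons, ih _ (by rw [pvFill_len]; exact hlen)]
    by_cases hc : cats[j] ∈ cks
    · simp [hc]
    · simp only [hc, if_false]
      by_cases hcc : cats[j] = c
      · rw [pvFill_eq cats out c j hj hlen hcc]
        simp [hcc]
      · rw [pvFill_ne cats out c j hj hcc]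
        simp [List.mem_cons, hcc, hc]

-- B's six passes give exactly pvBout
theorem pvAlt_eq_pvBout (cats : List Nat) (hall : ∀ x ∈ cats, x < 6) :
    (List.range 6).foldl (fun out c => pvFillCat cats out c)
      (List.replicate cats.length "") = pvBout cats := by
  refine List.ext_getElem? (fun j => ?_)
  rcases Nat.lt_or_ge j cats.length with hj | hj
  · rw [pvBout_getElem? cats j hj,
      pvFillFold cats (List.range 6) _ j hj (by simp)]
    simp [List.mem_range, hall _ (List.getElem_mem hj)]
  · rw [List.getElem?_eq_none, List.getElem?_eq_none]
    · rw [pvBout_len]; exact hj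
    · rw [pvFillFold_len, List.length_replicate]; exact hj

-- ===== VERDICT (by name: the statement is the Claim_ definition above) =====
theorem simulate_crm_actions_spec : Claim_equal_simulate_crm_actions := by
  intro actions _
  unfold Spec_simulate_crm_actions simulate_crm_actions simulate_crm_actions_alt
  have hall : ∀ x ∈ actions.map (fun a => pvClassify (PySem.Str.lower a)), x < 6 := by
    intro x hx
    obtain ⟨a, _, rfl⟩ := List.mem_map.mp hx
    exact pvClassify_lt _
  have hmain := pvFold_eq actions [] ([], pvInitCounters) rfl
    (by intro c hc; interval_cases c <;> decide)
  rw [hmain]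
  simp only [List.nil_append]
  rw [pvAlt_eq_pvBout _ hall]
  exact pvDedupA_nodup _ (pvBout_nodup _ hall)
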